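-- pv_equiv track=rewrite | github.com/inaciovasquez2020/cyclone-terminal-obstruction | scripts/cohomology/cohomology_invariant.py | incidence_matrix_vertices_edges
-- ===== SOURCE A (Python) =====
-- def edge_key(u, v):
--     return (u, v) if u <= v else (v, u)
--
-- def graph_edges(G):
--     E = []
--     seen = set()
--     for u in G:
--         for v in G[u]:
--             e = edge_key(u, v)
--             if e not in seen:
--                 seen.add(e)
--                 E.append(e)
--     return E
--
-- def incidence_matrix_vertices_edges(G):
--     V = sorted(G)
--     E = graph_edges(G)
--     vidx = {v: i for i, v in enumerate(V)}
--     A = [[0 for _ in range(len(E))] for _ in range(len(V))]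
--     for j, (u, v) in enumerate(E):
--         A[vidx[u]][j] ^= 1
--         A[vidx[v]][j] ^= 1
--     return V, E, A
-- ===== SOURCE B (Python) =====
-- # B: same V, E and vertex-index dict, but the GF(2) incidence matrix is built
-- # cell-by-cell (row i, column (u,v) is int(i==vidx[u]) ^ int(i==vidx[v]), i.e. 1 iff
-- # the row's vertex is exactly one endpoint) instead of XOR-scattering endpoint marks
-- # into a pre-allocated zero matrix.
--
-- def edge_key(u, v):
--     return (u, v) if u <= v else (v, u)
--
-- def graph_edges(G):
--     E = []
--     seen = set()
--     for u in G:
--         for v in G[u]: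
--             e = edge_key(u, v)
--             if e not in seen:
--                 seen.add(e)
--                 E.append(e)
--     return E
--
-- def incidence_matrix_vertices_edges(G):
--     V = sorted(G)
--     E = graph_edges(G)
--     vidx = {v: i for i, v in enumerate(V)}
--     A = [[int(i == vidx[u]) ^ int(i == vidx[v]) for (u, v) in E] for i in range(len(V))]
--     return V, E, A
-- ===== Notes on version B (the rewrite author's own statement) =====
-- stated objective: alternative
-- what changed: The zero-matrix allocation plus per-edge XOR scatter through vidx is replaced by a direct cell-wise construction with no mutation: cell (i, (u,v)) is computed as int(i==vidx[u]) ^ int(i==vidx[v]) in one nested comprehension over rows and edges.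
import Mathlib
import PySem

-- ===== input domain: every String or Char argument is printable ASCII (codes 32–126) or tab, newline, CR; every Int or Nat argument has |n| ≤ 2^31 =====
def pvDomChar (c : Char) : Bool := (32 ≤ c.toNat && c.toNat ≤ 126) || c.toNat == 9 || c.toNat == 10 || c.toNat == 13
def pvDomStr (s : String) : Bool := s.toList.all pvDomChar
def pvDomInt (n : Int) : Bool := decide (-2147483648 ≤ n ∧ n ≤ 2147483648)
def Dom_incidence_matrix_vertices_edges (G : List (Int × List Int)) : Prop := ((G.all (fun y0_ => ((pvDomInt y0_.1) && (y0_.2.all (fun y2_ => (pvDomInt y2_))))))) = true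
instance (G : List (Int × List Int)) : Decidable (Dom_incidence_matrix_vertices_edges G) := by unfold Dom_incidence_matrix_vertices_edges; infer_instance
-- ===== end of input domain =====

-- B builds the GF(2) incidence matrix cell-by-cell (cell (i,(u,v)) = int(i==vidx[u]) ^
-- int(i==vidx[v])) instead of A's zero-matrix allocation + per-edge XOR scatter; equal
-- return values on Pre_ (no mutation of the argument is involved).

-- ===== PORT A =====
-- shared helpers: Source B keeps edge_key and graph_edges verbatim, so both ports use these
def edgeKey (u v : Int) : Int × Int := if u ≤ v then (u, v) else (v, u)

def graphEdges (d : PySem.Dict Int (List Int)) : List (Int × Int) :=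
  (d.keys.foldl (fun (st : List (Int × Int) × PySem.Set (Int × Int)) u =>
      -- G[u] for u iterating over G: the key is present, so getD u [] is exact
      (d.getD u []).foldl (fun st v =>
        let e := edgeKey u v
        if st.2.contains e then st else (st.1 ++ [e], st.2.add e)) st)
    ([], PySem.Set.empty)).1

-- A[vidx[w]][j] ^= 1  (KeyError when w is missing from vidx: excluded by Pre_, getD then inert)
def scatterStep (vidx : PySem.Dict Int Int) (A : List (List Int)) (j : Int) (w : Int) :
    List (List Int) :=
  let i := vidx.getD w 0
  PySem.List.pySetD A i
    (PySem.List.pySetD (PySem.List.pyGetD A i []) j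
      (PySem.Int.bxor (PySem.List.pyGetD (PySem.List.pyGetD A i []) j 0) 1))

def incidence_matrix_vertices_edges (G : List (Int × List Int)) :
    List Int × (List (Int × Int)) × List (List Int) :=
  let d := PySem.Dict.ofList G
  let V := PySem.List.sorted d.keys (fun x => x) false
  let E := graphEdges d
  let vidx := (PySem.List.enumerate V).foldl (fun dd p => dd.insert p.2 p.1) PySem.Dict.empty
  let A0 := (List.range V.length).map (fun _ => (List.range E.length).map (fun _ => (0 : Int)))
  let A := (PySem.List.enumerate E).foldl
      (fun A p => scatterStep vidx (scatterStep vidx A p.1 p.2.1) p.1 p.2.2) A0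
  (V, E, A)

-- ===== PORT B =====
def incidence_matrix_vertices_edges_alt (G : List (Int × List Int)) :
    List Int × (List (Int × Int)) × List (List Int) :=
  let d := PySem.Dict.ofList G
  let V := PySem.List.sorted d.keys (fun x => x) false
  let E := graphEdges d
  let vidx := (PySem.List.enumerate V).foldl (fun dd p => dd.insert p.2 p.1) PySem.Dict.empty
  (V, E, (List.range V.length).map (fun (i : Nat) =>
      E.map (fun e => PySem.Int.bxor
        (if (i : Int) = vidx.getD e.1 0 then 1 else 0)
        (if (i : Int) = vidx.getD e.2 0 then 1 else 0))))

-- ===== PRECONDITION & SPEC =====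
-- Pre_ excludes exactly the dicts with a neighbour that is not a key: there A raises
-- KeyError at vidx[v] (A returns nothing, so nothing returnable is excluded).
def Pre_incidence_matrix_vertices_edges (G : List (Int × List Int)) : Prop :=
  ∀ p ∈ (PySem.Dict.ofList G).items, ∀ v ∈ p.2, v ∈ (PySem.Dict.ofList G).keys
instance (G : List (Int × List Int)) : Decidable (Pre_incidence_matrix_vertices_edges G) := by
  unfold Pre_incidence_matrix_vertices_edges; infer_instance

def pvWitness_incidence_matrix_vertices_edges : (List (Int × List Int)) :=
  [(0, [1]), (1, [0, 1])]

def Spec_incidence_matrix_vertices_edges (G : List (Int × List Int))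
    (out : List Int × (List (Int × Int)) × List (List Int)) : Prop :=
  out = incidence_matrix_vertices_edges_alt G
instance (G : List (Int × List Int)) (out : List Int × (List (Int × Int)) × List (List Int)) :
    Decidable (Spec_incidence_matrix_vertices_edges G out) := by
  unfold Spec_incidence_matrix_vertices_edges; infer_instance

-- ===== CLAIM (what is proved, stated in full; the proofs are below) =====
def Claim_equal_incidence_matrix_vertices_edges : Prop :=
  ∀ (G : List (Int × List Int)), Dom_incidence_matrix_vertices_edges G →
    Pre_incidence_matrix_vertices_edges G →
    Spec_incidence_matrix_vertices_edges G (incidence_matrix_vertices_edges G)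

-- ===== LEMMAS AND PROOFS =====

-- the cell value B computes
def cellB (x : Int) (e : Int × Int) : Int := if (x = e.1) ≠ (x = e.2) then 1 else 0

-- every edge of graphEdges has both endpoints among the keys (under Pre_)
theorem graphEdges_mem (d : PySem.Dict Int (List Int))
    (hpre : ∀ p ∈ d.items, ∀ v ∈ p.2, v ∈ d.keys) :
    ∀ e ∈ graphEdges d, e.1 ∈ d.keys ∧ e.2 ∈ d.keys := by
  unfold graphEdges
  refine List.foldlRecOn (motive := fun st : List (Int × Int) × PySem.Set (Int × Int) =>
      ∀ e ∈ st.1, e.1 ∈ d.keys ∧ e.2 ∈ d.keys) d.keys _ ?_ ?_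
  · intro e he; simp at he
  · intro st hst u hu
    -- neighbours of a key u all lie in keys
    have hnb : ∀ v ∈ d.getD u [], v ∈ d.keys := by
      intro v hv
      rcases hopt : d.get? u with _ | l
      · exact absurd ((PySem.Dict.get?_eq_none_iff_not_mem_keys d u).mp hopt) (not_not.mpr hu)
      · have hitems := PySem.Dict.mem_items_of_get?_eq_some d hopt
        have : d.getD u [] = l := by rw [PySem.Dict.getD_eq_get?_getD, hopt]; rfl
        exact hpre (u, l) hitems v (this ▸ hv)
    refine List.foldlRecOn (motive := fun st : List (Int × Int) × PySem.Set (Int × Int) =>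
        ∀ e ∈ st.1, e.1 ∈ d.keys ∧ e.2 ∈ d.keys) (d.getD u []) _ hst ?_
    intro st' hst' v hv
    by_cases hc : st'.2.contains (edgeKey u v) = true
    · intro e he
      rw [if_pos hc] at he
      exact hst' e he
    · intro e he
      rw [if_neg hc] at he
      rcases List.mem_append.mp he with h | h
      · exact hst' e h
      · have he' : e = edgeKey u v := by simpa using h
        subst he'
        unfold edgeKey
        split <;> exact ⟨by simp [hu, hnb v hv], by simp [hu, hnb v hv]⟩


theorem getD_at_len {α : Type} (l t : List α) (c d : α) :
    (l ++ c :: t).getD l.length d = c := by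
  simp [List.getD]

theorem set_at_len {α : Type} (l t : List α) (c y : α) :
    (l ++ c :: t).set l.length y = l ++ y :: t := by
  induction l with
  | nil => rfl
  | cons a l ih => simp [List.set_cons_succ, ih]

theorem row_update (fx : List Int) (t : List Int) (c : Int) (j : Nat) (hf : fx.length = j) :
    PySem.List.pySetD (fx ++ c :: t) (j : Int)
        (PySem.Int.bxor (PySem.List.pyGetD (fx ++ c :: t) (j : Int) 0) 1)
      = fx ++ (PySem.Int.bxor c 1) :: t := by
  subst hf
  rw [PySem.List.pySetD_natCast, PySem.List.pyGetD_natCast, getD_at_len, set_at_len]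

-- vidx maps each vertex of a nodup list to its index
theorem vidx_getD (V : List Int) (hnd : V.Nodup) (u : Int) (hu : u ∈ V) :
    ((PySem.List.enumerate V).foldl (fun dd p => dd.insert p.2 p.1) PySem.Dict.empty).getD u 0
      = (V.idxOf u : Int) := by
  have hsnd : List.map (fun p : Int × Int => p.2) (PySem.List.enumerate V (0 : Int)) = V :=
    PySem.List.map_snd_enumerate V (0 : Int)
  have hitems : ((PySem.List.enumerate V).foldl (fun dd p => dd.insert p.2 p.1)
      PySem.Dict.empty).items
      = (PySem.Dict.empty : PySem.Dict Int Int).items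
        ++ (PySem.List.enumerate V (0 : Int)).map (fun p => (p.2, p.1)) := by
    refine @PySem.Dict.items_foldl_insert_fresh Int Int _ _ (Int × Int) (PySem.List.enumerate V (0 : Int))
      (fun p : Int × Int => p.2) (fun p : Int × Int => p.1) (PySem.Dict.empty : PySem.Dict Int Int) ?_ ?_
    · intro a _; simp [PySem.Dict.contains_empty]
    · rw [hsnd]; exact hnd
  have hk : (V.idxOf u) < V.length := List.idxOf_lt_length_of_mem hu
  have hmem : (u, (V.idxOf u : Int)) ∈ ((PySem.List.enumerate V).foldl
      (fun dd p => dd.insert p.2 p.1) PySem.Dict.empty).items := by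
    rw [hitems]
    refine List.mem_append_right _ (List.mem_map.mpr ?_)
    refine ⟨((V.idxOf u : Int), u), ?_, ?_⟩
    · rw [PySem.List.mem_enumerate_iff]
      exact ⟨V.idxOf u, hk, by simp [List.getElem_idxOf]⟩
    · rfl
  have hkeys : ((PySem.List.enumerate V).foldl (fun dd p => dd.insert p.2 p.1)
      (PySem.Dict.empty : PySem.Dict Int Int)).keys.Nodup := by
    refine PySem.Dict.nodup_keys_foldl_insert_key _ (fun p : Int × Int => p.2) _ _ ?_
    simp [PySem.Dict.keys_empty]
  exact PySem.Dict.getD_of_mem_items _ hmem hkeys 0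


-- setting position idxOf u in a mapped-over-nodup-V matrix rewrites just u's row
theorem map_set_idxOf {β : Type} (V : List Int) (hnd : V.Nodup) (u : Int) (hu : u ∈ V)
    (g : Int → β) (y : β) :
    (V.map g).set (V.idxOf u) y = V.map (fun x => if x = u then y else g x) := by
  induction V with
  | nil => simp at hu
  | cons a V ih =>
    rcases List.nodup_cons.mp hnd with ⟨ha, hnd'⟩
    by_cases h : a = u
    · subst h
      rw [List.idxOf_cons_self]
      simp only [List.map_cons, List.set_cons_zero]
      congr 1
      exact (List.map_congr_left (fun x hx => by
        have hxa : ¬ x = a := fun hxa => ha (hxa ▸ hx)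
        simp [hxa])).symm
    · have hu' : u ∈ V := by
        rcases List.mem_cons.mp hu with h1 | h1
        · exact absurd h1.symm h
        · exact h1
      have hidx : (a :: V).idxOf u = V.idxOf u + 1 := by
        simp [List.idxOf_cons_ne _ h]
      rw [List.map_cons, hidx, List.set_cons_succ, List.map_cons, if_neg h, ih hnd' hu']


-- one scatter step on a matrix of the shape V.map g
theorem scatterStep_map (V : List Int) (hnd : V.Nodup)
    (vidx : PySem.Dict Int Int)
    (hv : ∀ w ∈ V, vidx.getD w 0 = (V.idxOf w : Int))
    (g : Int → List Int) (j : Nat) (u : Int) (hu : u ∈ V) :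
    scatterStep vidx (V.map g) (j : Int) u
      = V.map (fun x => if x = u then
          PySem.List.pySetD (g x) (j : Int)
            (PySem.Int.bxor (PySem.List.pyGetD (g x) (j : Int) 0) 1) else g x) := by
  have hk : V.idxOf u < V.length := List.idxOf_lt_length_of_mem hu
  have hrow : PySem.List.pyGetD (V.map g) ((V.idxOf u : Nat) : Int) [] = g u := by
    rw [PySem.List.pyGetD_natCast]
    simp [List.getD, List.getElem?_map, List.getElem?_eq_getElem hk, List.getElem_idxOf]
  show PySem.List.pySetD (V.map g) (vidx.getD u 0) (PySem.List.pySetD (PySem.List.pyGetD (V.map g) (vidx.getD u 0) []) (j:Int) (PySem.Int.bxor (PySem.List.pyGetD (PySem.List.pyGetD (V.map g) (vidx.getD u 0) []) (j:Int) 0) 1)) = _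
  rw [hv u hu]
  rw [hrow, PySem.List.pySetD_natCast]
  have hcong : (fun x => if x = u then
        PySem.List.pySetD (g x) (j : Int)
          (PySem.Int.bxor (PySem.List.pyGetD (g x) (j : Int) 0) 1) else g x)
      = (fun x => if x = u then
        PySem.List.pySetD (g u) (j : Int)
          (PySem.Int.bxor (PySem.List.pyGetD (g u) (j : Int) 0) 1) else g x) := by
    funext x; by_cases hx : x = u
    · subst hx; simp
    · simp [hx]
  rw [hcong]
  exact map_set_idxOf V hnd u hu g _


-- the scatter loop over the remaining edges, columns already built collected in f
theorem scatter_inv (V : List Int) (hnd : V.Nodup)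
    (vidx : PySem.Dict Int Int)
    (hv : ∀ w ∈ V, vidx.getD w 0 = (V.idxOf w : Int))
    (E : List (Int × Int)) (hE : ∀ e ∈ E, e.1 ∈ V ∧ e.2 ∈ V)
    (f : Int → List Int) (j0 : Nat) (hf : ∀ x, (f x).length = j0) :
    (PySem.List.enumerate E (j0 : Int)).foldl
        (fun A p => scatterStep vidx (scatterStep vidx A p.1 p.2.1) p.1 p.2.2)
        (V.map (fun x => f x ++ List.replicate E.length 0))
      = V.map (fun x => f x ++ E.map (cellB x)) := by
  induction E generalizing f j0 with
  | nil => simp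
  | cons e E' ih =>
    obtain ⟨u, v⟩ := e
    obtain ⟨hu, hvv⟩ := hE (u, v) List.mem_cons_self
    rw [PySem.List.enumerate_cons, List.foldl_cons]
    have hrep : List.replicate ((u, v) :: E').length (0 : Int)
        = 0 :: List.replicate E'.length 0 := rfl
    -- first scatter (endpoint u)
    rw [show (V.map (fun x => f x ++ List.replicate ((u, v) :: E').length 0))
        = V.map (fun x => f x ++ 0 :: List.replicate E'.length 0) from by rw [hrep]]
    rw [scatterStep_map V hnd vidx hv _ j0 u hu]
    -- rewrite the resulting rows into appended form
    have h1 : (fun x => if x = u then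
          PySem.List.pySetD (f x ++ 0 :: List.replicate E'.length 0) (j0 : Int)
            (PySem.Int.bxor (PySem.List.pyGetD (f x ++ 0 :: List.replicate E'.length 0) (j0 : Int) 0) 1)
          else f x ++ 0 :: List.replicate E'.length 0)
        = (fun x => f x ++ (if x = u then PySem.Int.bxor 0 1 else 0) :: List.replicate E'.length 0) := by
      funext x
      by_cases hx : x = u
      · rw [if_pos hx, if_pos hx, row_update _ _ _ _ (hf x)]
      · simp [hx]
    rw [h1, scatterStep_map V hnd vidx hv _ j0 v hvv]
    have h2 : (fun x => if x = v then
          PySem.List.pySetD (f x ++ (if x = u then PySem.Int.bxor 0 1 else 0) :: List.replicate E'.length 0) (j0 : Int)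
            (PySem.Int.bxor (PySem.List.pyGetD (f x ++ (if x = u then PySem.Int.bxor 0 1 else 0) :: List.replicate E'.length 0) (j0 : Int) 0) 1)
          else f x ++ (if x = u then PySem.Int.bxor 0 1 else 0) :: List.replicate E'.length 0)
        = (fun x => (f x ++ [cellB x (u, v)]) ++ List.replicate E'.length 0) := by
      funext x
      have hcell : (if x = v then PySem.Int.bxor (if x = u then PySem.Int.bxor 0 1 else 0) 1
          else (if x = u then PySem.Int.bxor 0 1 else 0)) = cellB x (u, v) := by
        simp only [cellB]
        by_cases h1 : x = u <;> by_cases h2 : x = v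
        · rw [if_pos h2, if_pos h1, if_neg (fun hne => hne (propext ⟨fun _ => h2, fun _ => h1⟩))]
          decide
        · rw [if_neg h2, if_pos h1, if_pos (fun (heq : (x = u) = (x = v)) => h2 (heq ▸ h1))]
          decide
        · rw [if_pos h2, if_neg h1, if_pos (fun (heq : (x = u) = (x = v)) => h1 (heq.symm ▸ h2))]
          decide
        · rw [if_neg h2, if_neg h1, if_neg (fun hne => hne (propext ⟨fun h => absurd h h1, fun h => absurd h h2⟩))]
      by_cases hx : x = v
      · rw [if_pos hx, row_update _ _ _ _ (hf x)]
        rw [List.append_assoc, List.singleton_append]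
        rw [← hcell, if_pos hx]
      · rw [if_neg hx, List.append_assoc, List.singleton_append, ← hcell, if_neg hx]
    rw [h2]
    have hcast : (j0 : Int) + 1 = ((j0 + 1 : Nat) : Int) := by push_cast; ring
    rw [hcast, ih (fun e he => hE e (List.mem_cons_of_mem _ he))
        (fun x => f x ++ [cellB x (u, v)]) (j0 + 1) (fun x => by simp [hf x])]
    apply List.map_congr_left
    intro x _
    simp [List.append_assoc]


-- ===== VERDICT (by name: the statement is the Claim_ definition above) =====
theorem incidence_matrix_vertices_edges_spec : Claim_equal_incidence_matrix_vertices_edges := by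
  intro G _hdom hpre
  unfold Spec_incidence_matrix_vertices_edges
  unfold incidence_matrix_vertices_edges incidence_matrix_vertices_edges_alt
  set d := PySem.Dict.ofList G with hd
  set V := PySem.List.sorted d.keys (fun x => x) false with hV
  set E := graphEdges d with hEdef
  have hnd : V.Nodup := ((PySem.List.sorted_perm d.keys (fun x => x) false).nodup_iff).mpr
    (PySem.Dict.nodup_keys_ofList G)
  have hv : ∀ w ∈ V, ((PySem.List.enumerate V).foldl (fun dd p => dd.insert p.2 p.1)
      PySem.Dict.empty).getD w 0 = (V.idxOf w : Int) :=
    fun w hw => vidx_getD V hnd w hw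
  have hE : ∀ e ∈ E, e.1 ∈ V ∧ e.2 ∈ V := by
    intro e he
    obtain ⟨h1, h2⟩ := graphEdges_mem d hpre e he
    exact ⟨(PySem.List.mem_sorted d.keys (fun x => x) false e.1).mpr h1,
           (PySem.List.mem_sorted d.keys (fun x => x) false e.2).mpr h2⟩
  have hinit : (List.range V.length).map (fun _ => (List.range E.length).map fun _ => (0 : Int))
      = V.map (fun x => ([] : List Int) ++ List.replicate E.length 0) := by
    simp [List.map_const']
  have hmain := scatter_inv V hnd _ hv E hE (fun _ => []) 0 (fun _ => rfl)
  rw [Nat.cast_zero] at hmain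
  simp only []
  rw [hinit, hmain]
  refine congrArg _ (congrArg _ ?_)
  apply List.ext_getElem (by simp only [List.length_map, List.length_range, ← hV])
  intro i h1 h2
  have hlen : i < V.length := by simpa using h1
  simp only [List.getElem_map, List.getElem_range, List.nil_append]
  refine List.map_congr_left fun e he => ?_
  obtain ⟨hu, hv2⟩ := hE e he
  rw [hv e.1 hu, hv e.2 hv2]
  have hiff : ∀ u : Int, u ∈ V → ((V[i] = u) ↔ ((i : Int) = (V.idxOf u : Int))) := by
    intro u hmem
    rw [Int.natCast_inj]
    constructor
    · intro h
      have h2 : V[i] = V[V.idxOf u]'(List.idxOf_lt_length_of_mem hmem) := by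
        rw [List.getElem_idxOf]; exact h
      exact (List.Nodup.getElem_inj_iff hnd).mp h2
    · intro h; subst h; exact List.getElem_idxOf _
  unfold cellB
  by_cases hx1 : V[i] = e.1 <;> by_cases hx2 : V[i] = e.2
  · rw [if_neg (fun hne => hne (propext ⟨fun _ => hx2, fun _ => hx1⟩)),
      if_pos ((hiff e.1 hu).mp hx1), if_pos ((hiff e.2 hv2).mp hx2)]
    decide
  · rw [if_pos (fun (heq : (V[i] = e.1) = (V[i] = e.2)) => hx2 (heq ▸ hx1)),
      if_pos ((hiff e.1 hu).mp hx1), if_neg (fun h => hx2 ((hiff e.2 hv2).mpr h))]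
    decide
  · rw [if_pos (fun (heq : (V[i] = e.1) = (V[i] = e.2)) => hx1 (heq.symm ▸ hx2)),
      if_neg (fun h => hx1 ((hiff e.1 hu).mpr h)), if_pos ((hiff e.2 hv2).mp hx2)]
    decide
  · rw [if_neg (fun hne => hne (propext ⟨fun h => absurd h hx1, fun h => absurd h hx2⟩)),
      if_neg (fun h => hx1 ((hiff e.1 hu).mpr h)), if_neg (fun h => hx2 ((hiff e.2 hv2).mpr h))]
    decide
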